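-- pv_equiv track=rewrite | github.com/jayabrotabanerjee/Wojak_Generator | src/face_detection/landmarks.py | get_face_center
-- ===== SOURCE A (Python) =====
-- from typing import List, Dict, Optional, Tuple
--
-- def get_face_center(landmarks: Dict[str, List[Tuple[int, int]]]) -> Tuple[int, int]:
--     """
--     Calculate the center point of the face
--
--     Args:
--         landmarks: Dictionary of facial landmarks
--
--     Returns:
--         Center coordinates (x, y)
--     """
--     all_points = []
--     for feature_points in landmarks.values():
--         all_points.extend(feature_points)
--
--     if not all_points:
--         return (0, 0)
--
--     center_x = sum(point[0] for point in all_points) // len(all_points)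
--     center_y = sum(point[1] for point in all_points) // len(all_points)
--
--     return (center_x, center_y)
-- ===== SOURCE B (Python) =====
-- def _pair_up(segs):
--     """Merge adjacent (sum_x, sum_y, count) segments pairwise."""
--     out = []
--     i = 0
--     while i + 1 < len(segs):
--         ax, ay, an = segs[i]
--         bx, by, bn = segs[i + 1]
--         out.append((ax + bx, ay + by, an + bn))
--         i += 2
--     if i < len(segs):
--         out.append(segs[i])
--     return out
--
--
-- def get_face_center(landmarks):
--     """Balanced tree reduction: each point becomes a (x, y, 1) segment,
--     then adjacent segments are merged pairwise until one total remains."""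
--     segs = [(x, y, 1) for pts in landmarks.values() for (x, y) in pts]
--     if not segs:
--         return (0, 0)
--     while len(segs) > 1:
--         segs = _pair_up(segs)
--     sx, sy, n = segs[0]
--     return (sx // n, sy // n)
-- ===== Notes on version B (the rewrite author's own statement) =====
-- stated objective: alternative
-- what changed: Replaced A's flatten-then-two-global-sums with a balanced tree reduction: every point becomes an (x, y, 1) segment and adjacent segments are merged pairwise in O(log n) rounds until one total remains; correct because componentwise sums are preserved by each merge round (addition is associative/commutative).
import Mathlib
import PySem

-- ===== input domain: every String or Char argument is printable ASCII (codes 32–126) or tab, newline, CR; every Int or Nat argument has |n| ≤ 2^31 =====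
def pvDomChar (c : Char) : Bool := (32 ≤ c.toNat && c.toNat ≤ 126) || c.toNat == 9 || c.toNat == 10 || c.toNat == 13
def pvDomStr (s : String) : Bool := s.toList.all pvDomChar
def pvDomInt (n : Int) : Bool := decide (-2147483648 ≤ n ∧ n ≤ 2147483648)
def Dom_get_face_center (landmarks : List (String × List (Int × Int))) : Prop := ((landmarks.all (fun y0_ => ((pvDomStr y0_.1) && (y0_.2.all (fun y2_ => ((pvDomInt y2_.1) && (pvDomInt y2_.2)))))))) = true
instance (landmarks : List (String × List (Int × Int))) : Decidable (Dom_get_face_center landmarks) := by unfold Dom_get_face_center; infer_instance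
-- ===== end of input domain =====

-- B replaces A's flatten-then-two-global-sums with a balanced pairwise tree reduction of (x, y, 1) segments.

-- ===== PORT A =====
-- A: collect all points into one list, then two generator sums over it.
def get_face_center (landmarks : List (String × List (Int × Int))) : Int × Int :=
  let all_points := landmarks.foldl (fun acc kv => acc ++ kv.2) ([] : List (Int × Int))
  if all_points = [] then (0, 0)
  else
    (PySem.Int.floordiv ((all_points.map (fun p => p.1)).sum) (all_points.length : Int),
     PySem.Int.floordiv ((all_points.map (fun p => p.2)).sum) (all_points.length : Int))

-- ===== PORT B =====
-- _pair_up: merge adjacent (sum_x, sum_y, count) segments pairwise, odd leftover kept.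
def pairUp : List (Int × Int × Int) → List (Int × Int × Int)
  | a :: b :: rest => (a.1 + b.1, a.2.1 + b.2.1, a.2.2 + b.2.2) :: pairUp rest
  | l => l

lemma pairUp_length_le : ∀ (l : List (Int × Int × Int)), (pairUp l).length ≤ l.length := by
  intro l
  induction l using pairUp.induct with
  | case1 a b rest ih => simp [pairUp]; omega
  | case2 l _ => simp [pairUp]

lemma pairUp_length_lt (a b : Int × Int × Int) (rest : List (Int × Int × Int)) :
    (pairUp (a :: b :: rest)).length < (a :: b :: rest).length := by
  have := pairUp_length_le rest
  simp [pairUp]; omega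

-- the while-loop: keep merging until at most one segment remains
def reduceSegs : List (Int × Int × Int) → List (Int × Int × Int)
  | [] => []
  | [s] => [s]
  | s :: t :: rest => reduceSegs (pairUp (s :: t :: rest))
termination_by l => l.length
decreasing_by exact pairUp_length_lt s t rest

def get_face_center_alt (landmarks : List (String × List (Int × Int))) : Int × Int :=
  let segs := (landmarks.flatMap (fun kv => kv.2)).map (fun p => (p.1, p.2, (1 : Int)))
  match reduceSegs segs with
  | (sx, sy, n) :: _ => (PySem.Int.floordiv sx n, PySem.Int.floordiv sy n)
  | [] => (0, 0)

-- ===== PRECONDITION & SPEC =====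
def Spec_get_face_center (landmarks : List (String × List (Int × Int))) (out : Int × Int) : Prop := out = get_face_center_alt landmarks
instance (landmarks : List (String × List (Int × Int))) (out : Int × Int) : Decidable (Spec_get_face_center landmarks out) := by unfold Spec_get_face_center; infer_instance

-- ===== CLAIM (what is proved, stated in full; the proofs are below) =====
def Claim_equal_get_face_center : Prop := ∀ (landmarks : List (String × List (Int × Int))), Dom_get_face_center landmarks → Spec_get_face_center landmarks (get_face_center landmarks)

-- ===== LEMMAS AND PROOFS =====
lemma pairUp_sums (f : Int × Int × Int → Int) (hf : ∀ a b : Int × Int × Int,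
      f (a.1 + b.1, a.2.1 + b.2.1, a.2.2 + b.2.2) = f a + f b) :
    ∀ l : List (Int × Int × Int), ((pairUp l).map f).sum = (l.map f).sum := by
  intro l
  induction l using pairUp.induct with
  | case1 a b rest ih => simp [pairUp, hf, ih]; ring
  | case2 l h =>
      rcases l with _ | ⟨a, _ | ⟨b, r⟩⟩
      · rfl
      · rfl
      · exact absurd rfl (h a b r)

lemma pairUp_ne_nil (a b : Int × Int × Int) (rest : List (Int × Int × Int)) :
    pairUp (a :: b :: rest) ≠ [] := by simp [pairUp]

lemma reduceSegs_eq : ∀ l : List (Int × Int × Int), l ≠ [] →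
    reduceSegs l = [((l.map (fun s => s.1)).sum, (l.map (fun s => s.2.1)).sum,
                     (l.map (fun s => s.2.2)).sum)] := by
  intro l
  induction l using reduceSegs.induct with
  | case1 => intro h; exact absurd rfl h
  | case2 s => intro _; simp [reduceSegs]
  | case3 s t rest ih =>
      intro _
      rw [reduceSegs, ih (pairUp_ne_nil s t rest)]
      rw [pairUp_sums (fun s => s.1) (by intro a b; rfl),
          pairUp_sums (fun s => s.2.1) (by intro a b; rfl),
          pairUp_sums (fun s => s.2.2) (by intro a b; rfl)]

lemma foldl_append_flatMap (L : List (String × List (Int × Int))) :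
    ∀ acc : List (Int × Int),
      L.foldl (fun acc kv => acc ++ kv.2) acc = acc ++ L.flatMap (fun kv => kv.2) := by
  induction L with
  | nil => simp [List.foldl]
  | cons h t ih => intro acc; simp [List.foldl, ih, List.flatMap_cons]

-- ===== VERDICT (by name: the statement is the Claim_ definition above) =====
theorem get_face_center_spec : Claim_equal_get_face_center := by
  intro landmarks _
  unfold Spec_get_face_center get_face_center get_face_center_alt
  rw [foldl_append_flatMap]
  simp only [List.nil_append]
  set pts := landmarks.flatMap (fun kv => kv.2) with hpts
  by_cases h : pts = []
  · simp [h, reduceSegs]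
  · have hne : pts.map (fun p => (p.1, p.2, (1 : Int))) ≠ [] := by
      simpa using h
    have h3 : ∀ l : List (Int × Int), (l.map (fun _ => (1:Int))).sum = (l.length : Int) := by
      intro l
      induction l with
      | nil => simp
      | cons a t ih => simp at ih ⊢; omega
    rw [if_neg h, reduceSegs_eq _ hne, List.map_map, List.map_map, List.map_map]
    simp only [Function.comp_def]
    rw [h3 pts]
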